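-- pv_equiv track=rewrite | github.com/patriciarodrigues151/Me-todo-dos-Quadrados-Minimos-de-Interpolacaoo-Polinomial-Algebra-Linear | QuadradosMínimos.py | sistemaNormal
-- ===== SOURCE A (Python) =====
-- import math
--
-- def sistemaNormal(x, y, n):
-- 	a = 0
-- 	matrizNormal = []
-- 	m = math.sqrt(n)
-- 	m = int(m)
-- 	for i in range(m):
-- 		linha = []
-- 		for j in range(m):
-- 			a = 0
-- 			for k in range(n):
-- 				a = a + 1 * pow(x[k],j+i)
-- 			linha.append(a)
-- 		matrizNormal.append(linha)
-- 	return matrizNormal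
-- ===== SOURCE B (Python) =====
-- import math
--
-- def sistemaNormal(x, y, n):
--     m = math.isqrt(n)
--     pts = x[:n]
--     S = [sum(v ** p for v in pts) for p in range(2 * m - 1)]
--     return [[S[i + j] for j in range(m)] for i in range(m)]
-- ===== Notes on version B (the rewrite author's own statement) =====
-- stated objective: faster
-- what changed: Instead of recomputing the power sum sum(x[k]^(i+j)) for every matrix cell, B precomputes the power sums S[p] for p = 0..2m-2 once and fills each cell by indexing S[i+j].
import Mathlib
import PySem

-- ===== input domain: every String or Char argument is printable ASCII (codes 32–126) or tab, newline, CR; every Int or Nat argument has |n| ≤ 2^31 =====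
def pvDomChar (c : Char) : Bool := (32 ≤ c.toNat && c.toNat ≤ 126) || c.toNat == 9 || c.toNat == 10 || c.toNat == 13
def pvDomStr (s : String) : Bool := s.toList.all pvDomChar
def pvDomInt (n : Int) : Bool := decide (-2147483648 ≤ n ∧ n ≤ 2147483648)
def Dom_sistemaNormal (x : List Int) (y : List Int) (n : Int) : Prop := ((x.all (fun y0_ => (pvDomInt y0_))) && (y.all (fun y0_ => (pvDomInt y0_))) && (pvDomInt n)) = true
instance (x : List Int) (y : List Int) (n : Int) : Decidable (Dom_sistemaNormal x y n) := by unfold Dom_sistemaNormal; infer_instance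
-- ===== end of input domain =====

-- B precomputes the power sums S[p] once (O(m*n)) instead of A's per-cell inner loop (O(m^2*n)); return values agree on Pre_.

-- ===== PORT A =====
-- int(math.sqrt(n)) = Nat.sqrt n.toNat for 0 ≤ n ≤ 2^31 (Dom bound; double sqrt is correctly rounded there)
def sistemaNormal (x : List Int) (y : List Int) (n : Int) : List (List Int) :=
  let m := Nat.sqrt n.toNat
  (List.range m).map (fun i =>
    (List.range m).map (fun j =>
      (List.range n.toNat).foldl (fun a k => a + 1 * (x.getD k 0) ^ (j + i)) 0))

-- ===== PORT B =====
def sistemaNormal_alt (x : List Int) (y : List Int) (n : Int) : List (List Int) :=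
  let m := Nat.sqrt n.toNat
  let pts := PySem.List.slice x none (some n)
  let S := (List.range (2 * m - 1)).map (fun p => (pts.map (fun v => v ^ p)).sum)
  (List.range m).map (fun i => (List.range m).map (fun j => S.getD (i + j) 0))

-- ===== PRECONDITION & SPEC =====
-- A raises ValueError (math.sqrt) for n < 0 and IndexError (x[k]) for n > len(x); Pre_ is exactly where A returns.
def Pre_sistemaNormal (x : List Int) (y : List Int) (n : Int) : Prop := 0 ≤ n ∧ n ≤ (x.length : Int)
instance (x : List Int) (y : List Int) (n : Int) : Decidable (Pre_sistemaNormal x y n) := by unfold Pre_sistemaNormal; infer_instance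
def pvWitness_sistemaNormal : List Int × List Int × Int := ([1, 2, 3, 4], [5, 6], 4)


def Spec_sistemaNormal (x : List Int) (y : List Int) (n : Int) (out : List (List Int)) : Prop := out = sistemaNormal_alt x y n
instance (x : List Int) (y : List Int) (n : Int) (out : List (List Int)) : Decidable (Spec_sistemaNormal x y n out) := by unfold Spec_sistemaNormal; infer_instance

-- ===== CLAIM (what is proved, stated in full; the proofs are below) =====
def Claim_equal_sistemaNormal : Prop := ∀ (x : List Int) (y : List Int) (n : Int), Dom_sistemaNormal x y n → Pre_sistemaNormal x y n → Spec_sistemaNormal x y n (sistemaNormal x y n)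

-- ===== LEMMAS AND PROOFS =====

-- A's inner loop over k equals the sum of p-th powers of the first N points.
lemma innerLoop_eq_powSum (x : List Int) (e : ℕ) :
    ∀ N : ℕ, N ≤ x.length →
      (List.range N).foldl (fun a k => a + 1 * (x.getD k 0) ^ e) 0
        = ((x.take N).map (fun v => v ^ e)).sum := by
  intro N
  induction N with
  | zero => simp
  | succ N ih =>
    intro h
    have hN : N < x.length := by omega
    have ht : x.take (N + 1) = x.take N ++ [x.getD N 0] := by
      rw [List.take_succ, List.getElem?_eq_getElem hN]
      simp [List.getD_eq_getElem?_getD, List.getElem?_eq_getElem hN]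
    rw [List.range_succ, List.foldl_append, ih (by omega), ht, List.map_append, List.sum_append]
    simp

theorem sistemaNormal_spec : Claim_equal_sistemaNormal := by
  intro x y n _ hpre
  obtain ⟨hn0, hnl⟩ := hpre
  have hlen : n.toNat ≤ x.length := by omega
  unfold Spec_sistemaNormal sistemaNormal sistemaNormal_alt
  simp only
  rw [PySem.List.slice_to x hn0]
  apply List.map_congr_left
  intro i hi
  apply List.map_congr_left
  intro j hj
  rw [List.mem_range] at hi hj
  rw [innerLoop_eq_powSum x (j + i) n.toNat hlen]
  have hij : i + j < 2 * Nat.sqrt n.toNat - 1 := by omega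
  rw [List.getD_eq_getElem?_getD, List.getElem?_map, List.getElem?_range hij]
  simp [Nat.add_comm j i]
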